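-- pv_equiv track=rewrite | github.com/Runn1dDefault/PDF_Parser | interactors/utils.py | word_by_chars_num_to_last_letter
-- ===== SOURCE A (Python) =====
-- def word_by_chars_num_to_last_letter(value: str, chars_num: int) -> str:
--     # find a word by the number of characters up to the last letter
--     assert chars_num > 0
--
--     if len(value) < chars_num:
--         return ''
--
--     for s_index, symbol in enumerate(value):
--         if s_index + 1 == chars_num and symbol.strip() and not value[s_index + 1].strip():
--             return value[:s_index + 1].split()[-1]
--
--     return ''
-- ===== SOURCE B (Python) =====
-- def word_by_chars_num_to_last_letter(value: str, chars_num: int) -> str: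
--     # simpler: direct index test instead of the enumerate loop, backward scan instead of split()[-1]
--     assert chars_num > 0
--     if len(value) < chars_num:
--         return ''
--     if value[chars_num - 1].strip() and not value[chars_num].strip():
--         i = chars_num - 1
--         while i > 0 and value[i - 1].strip():
--             i -= 1
--         return value[i:chars_num]
--     return ''
-- ===== Notes on version B (the rewrite author's own statement) =====
-- stated objective: simpler
-- what changed: B replaces A's forward enumerate loop plus split()-and-take-last with a direct test of the two characters at chars_num-1/chars_num and a backward scan from chars_num-1 to the preceding whitespace, returning that slice.
import Mathlib
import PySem

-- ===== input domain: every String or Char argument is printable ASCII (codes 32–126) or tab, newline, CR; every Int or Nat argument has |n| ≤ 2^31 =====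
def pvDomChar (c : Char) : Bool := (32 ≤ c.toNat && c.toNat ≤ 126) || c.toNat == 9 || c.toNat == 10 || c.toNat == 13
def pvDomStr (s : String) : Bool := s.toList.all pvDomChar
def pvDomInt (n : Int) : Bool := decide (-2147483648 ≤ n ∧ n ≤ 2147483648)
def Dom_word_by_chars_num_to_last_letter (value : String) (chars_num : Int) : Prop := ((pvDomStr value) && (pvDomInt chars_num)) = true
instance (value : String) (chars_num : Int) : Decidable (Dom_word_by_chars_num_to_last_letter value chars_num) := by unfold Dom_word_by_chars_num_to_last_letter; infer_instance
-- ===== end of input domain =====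

-- B replaces A's forward enumerate loop + split()[-1] with a direct test of the two characters
-- at chars_num-1 / chars_num and a backward scan to the preceding whitespace (objective: simpler).


-- ===== PORT A =====
-- A's for-loop over enumerate(value): at each (s_index, symbol) the same three-part test;
-- value[s_index+1] is read with pyGetD (Pre_ excludes the one input where Python raises there)
def pvALoop (full : List Char) (chars_num : Int) : List (Int × Char) → String
  | [] => ""
  | (i, c) :: rest =>
    if i + 1 = chars_num ∧ PySem.Chars.strip [c] ≠ [] ∧
        PySem.Chars.strip [PySem.List.pyGetD full (i + 1) ' '] = [] then
      String.ofList (PySem.List.pyGetD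
        (PySem.Chars.split₀ (PySem.List.slice full none (some (i + 1)))) (-1) [])
    else pvALoop full chars_num rest

def word_by_chars_num_to_last_letter (value : String) (chars_num : Int) : String :=
  if (value.toList.length : Int) < chars_num then ""
  else pvALoop value.toList chars_num (PySem.List.enumerate value.toList 0)

-- ===== PORT B =====
-- B's backward while loop: while i > 0 and value[i-1].strip(): i -= 1
def pvBScan (l : List Char) : Nat → Nat
  | 0 => 0
  | (i + 1) => if PySem.Chars.strip [l.getD i ' '] ≠ [] then pvBScan l i else i + 1

def word_by_chars_num_to_last_letter_alt (value : String) (chars_num : Int) : String :=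
  let l := value.toList
  if (l.length : Int) < chars_num then ""
  else if PySem.Chars.strip [PySem.List.pyGetD l (chars_num - 1) ' '] ≠ [] ∧
      PySem.Chars.strip [PySem.List.pyGetD l chars_num ' '] = [] then
    String.ofList (PySem.List.slice l (some ((pvBScan l (chars_num - 1).toNat : Nat) : Int)) (some chars_num))
  else ""

-- ===== PRECONDITION & SPEC =====
-- Pre_ excludes exactly the inputs on which the Python A raises (and B raises identically):
-- chars_num ≤ 0 (AssertionError), and len(value) == chars_num with a non-whitespace last
-- character (IndexError from value[chars_num]).
def Pre_word_by_chars_num_to_last_letter (value : String) (chars_num : Int) : Prop :=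
  0 < chars_num ∧
    ((value.toList.length : Int) = chars_num →
      PySem.Chars.isspace (value.toList.getD (chars_num - 1).toNat ' ') = true)
instance (value : String) (chars_num : Int) : Decidable (Pre_word_by_chars_num_to_last_letter value chars_num) := by unfold Pre_word_by_chars_num_to_last_letter; infer_instance

def pvWitness_word_by_chars_num_to_last_letter : String × Int := ("ab cd ef", 5)

def Spec_word_by_chars_num_to_last_letter (value : String) (chars_num : Int) (out : String) : Prop := out = word_by_chars_num_to_last_letter_alt value chars_num
instance (value : String) (chars_num : Int) (out : String) : Decidable (Spec_word_by_chars_num_to_last_letter value chars_num out) := by unfold Spec_word_by_chars_num_to_last_letter; infer_instance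

-- ===== CLAIM (what is proved, stated in full; the proofs are below) =====
def Claim_equal_word_by_chars_num_to_last_letter : Prop := ∀ (value : String) (chars_num : Int), Dom_word_by_chars_num_to_last_letter value chars_num → Pre_word_by_chars_num_to_last_letter value chars_num → Spec_word_by_chars_num_to_last_letter value chars_num (word_by_chars_num_to_last_letter value chars_num)

-- ===== LEMMAS AND PROOFS =====

-- single-character strip is empty exactly on whitespace
lemma pv_strip_singleton (c : Char) :
    PySem.Chars.strip [c] = [] ↔ PySem.Chars.isspace c = true := by
  simp only [PySem.Chars.strip, PySem.Chars.lstrip, PySem.Chars.rstrip]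
  cases h : PySem.Chars.isspace c <;> simp [h, List.dropWhile]

-- takeWhile ignores everything past a failing element
lemma pv_takeWhile_append (p : Char → Bool) (xs ys : List Char) (x : Char)
    (hx : x ∈ xs) (h : p x = false) : (xs ++ ys).takeWhile p = xs.takeWhile p := by
  induction xs with
  | nil => simp at hx
  | cons a t ih =>
    simp only [List.cons_append, List.takeWhile]
    cases hp : p a
    · simp
    · simp only [List.mem_cons] at hx
      rcases hx with rfl | hx
      · rw [hp] at h; exact absurd h (by simp)
      · simp [ih hx]

lemma pvBScan_le (l : List Char) (i : Nat) : pvBScan l i ≤ i := by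
  induction i with
  | zero => simp [pvBScan]
  | succ n ih => simp only [pvBScan]; split <;> omega

-- the backward scan yields the start of the maximal non-space suffix of take (i+1) l
lemma pvBScan_drop (l : List Char) (i : Nat) (hi : i < l.length)
    (hns : PySem.Chars.isspace (l[i]'hi) = false) :
    (l.take (i+1)).drop (pvBScan l i)
      = ((l.take (i+1)).reverse.takeWhile (fun c => !PySem.Chars.isspace c)).reverse := by
  induction i with
  | zero =>
    have h1 : l.take 1 = [l[0]'hi] := by
      cases l with
      | nil => simp at hi
      | cons a t => simp
    simp [pvBScan, h1, List.takeWhile, hns]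
  | succ n ih =>
    have hn : n < l.length := by omega
    have htake : l.take (n+2) = l.take (n+1) ++ [l[n+1]'hi] := by
      rw [List.take_succ]
      simp [List.getElem?_eq_getElem hi]
    have hrev : (l.take (n+2)).reverse = (l[n+1]'hi) :: (l.take (n+1)).reverse := by
      rw [htake]; simp
    have hrhs : ((l.take (n+2)).reverse.takeWhile (fun c => !PySem.Chars.isspace c))
        = (l[n+1]'hi) :: ((l.take (n+1)).reverse.takeWhile (fun c => !PySem.Chars.isspace c)) := by
      rw [hrev, List.takeWhile_cons_of_pos (by simp [hns])]
    simp only [pvBScan]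
    have hgetD : l.getD n ' ' = l[n]'hn := by
      rw [List.getD_eq_getElem?_getD, List.getElem?_eq_getElem hn]
      rfl
    by_cases hsp : PySem.Chars.isspace (l[n]'hn) = true
    · -- previous char is a space: scan stops at n+1
      rw [if_neg (by rw [hgetD]; simp [pv_strip_singleton, hsp])]
      have hdrop : (l.take (n+2)).drop (n+1) = [l[n+1]'hi] := by
        rw [htake, List.drop_append_of_le_length (by simp; omega)]
        have hnil : (l.take (n+1)).drop (n+1) = [] := List.drop_eq_nil_of_le (by simp)
        rw [hnil]
        rfl
      have hhead : (l.take (n+1)).reverse.takeWhile (fun c => !PySem.Chars.isspace c) = [] := by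
        have : (l.take (n+1)).reverse = (l[n]'hn) :: (l.take n).reverse := by
          rw [List.take_succ, List.getElem?_eq_getElem hn]; simp
        rw [this, List.takeWhile_cons_of_neg (by simp [hsp])]
      rw [hdrop, hrhs, hhead]
      simp
    · -- previous char non-space: recurse
      have hsp' : PySem.Chars.isspace (l[n]'hn) = false := by
        cases h : PySem.Chars.isspace (l[n]'hn) <;> simp_all
      rw [if_pos (by rw [hgetD]; simp [pv_strip_singleton, hsp'])]
      have hle : pvBScan l n ≤ n := pvBScan_le l n
      have hlen1 : (l.take (n+1)).length = n + 1 := by simp; omega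
      have hdrop2 : (l.take (n+2)).drop (pvBScan l n)
          = (l.take (n+1)).drop (pvBScan l n) ++ [l[n+1]'hi] := by
        rw [htake, List.drop_append_of_le_length (by rw [hlen1]; omega)]
      rw [hdrop2, ih hn hsp', hrhs]
      simp

-- the last element of split₀.go, when the pending input ends in a non-space char
lemma pv_go_last (p : List Char) (cur : List Char) (acc : List (List Char))
    (hp : p ≠ []) (hl : PySem.Chars.isspace (p.getLast hp) = false) :
    PySem.List.pyGetD (PySem.Chars.split₀.go p cur acc) (-1) []
      = if p.all (fun c => !PySem.Chars.isspace c) then cur.reverse ++ p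
        else (p.reverse.takeWhile (fun c => !PySem.Chars.isspace c)).reverse := by
  induction p generalizing cur acc with
  | nil => exact absurd rfl hp
  | cons c rest ih =>
    by_cases hr : rest = []
    · subst hr
      have hc : PySem.Chars.isspace c = false := hl
      simp only [PySem.Chars.split₀.go, hc, Bool.false_eq_true, if_false]
      simp [PySem.List.pyGetD_neg_one_append_singleton, hc]
    · have hlast : PySem.Chars.isspace (rest.getLast hr) = false := by
        rwa [List.getLast_cons hr] at hl
      simp only [PySem.Chars.split₀.go]
      cases hc : PySem.Chars.isspace c
      · -- c non-space: extend cur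
        simp only [Bool.false_eq_true, if_false]
        rw [ih (c :: cur) acc hr hlast]
        by_cases hall : rest.all (fun c => !PySem.Chars.isspace c) = true
        · simp [hall, hc]
        · have hallF : rest.all (fun c => !PySem.Chars.isspace c) = false := by
            cases h : rest.all (fun c => !PySem.Chars.isspace c)
            · rfl
            · exact absurd h hall
          obtain ⟨x, hx, hxs⟩ : ∃ x ∈ rest, (!PySem.Chars.isspace x) = false := by
            simpa using List.all_eq_false.mp hallF
          rw [if_neg (by simp [hallF]), if_neg (by simp [hallF, hc])]
          have hrv : (c :: rest).reverse = rest.reverse ++ [c] := by simp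
          rw [hrv, pv_takeWhile_append _ _ _ x (by simp [hx]) hxs]
      · -- c is a space: start a new word
        simp only [if_true]
        have hallF : (c :: rest).all (fun c => !PySem.Chars.isspace c) = false := by
          simp [hc]
        have hrv : (c :: rest).reverse = rest.reverse ++ [c] := by simp
        have htw : ((c :: rest).reverse).takeWhile (fun c => !PySem.Chars.isspace c)
            = if rest.all (fun c => !PySem.Chars.isspace c) = true then rest.reverse
              else rest.reverse.takeWhile (fun c => !PySem.Chars.isspace c) := by
          by_cases hall : rest.all (fun c => !PySem.Chars.isspace c) = true
          · rw [if_pos hall, hrv, List.takeWhile_append_of_pos (by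
                intro x hx
                simpa using (List.all_eq_true.mp hall) x (List.mem_reverse.mp hx))]
            simp [List.takeWhile_cons_of_neg, hc]
          · have hallF' : rest.all (fun c => !PySem.Chars.isspace c) = false := by
              cases h : rest.all (fun c => !PySem.Chars.isspace c)
              · rfl
              · exact absurd h hall
            obtain ⟨x, hx, hxs⟩ : ∃ x ∈ rest, (!PySem.Chars.isspace x) = false := by
              simpa using List.all_eq_false.mp hallF'
            rw [if_neg hall, hrv]
            exact pv_takeWhile_append _ _ _ x (by simp [hx]) hxs
        simp only [hallF, Bool.false_eq_true, if_false, htw]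
        split
        · rw [ih [] acc hr hlast]
          by_cases hall : rest.all (fun c => !PySem.Chars.isspace c) = true
          · simp [hall]
          · simp [hall]
        · rw [ih [] (cur.reverse :: acc) hr hlast]
          by_cases hall : rest.all (fun c => !PySem.Chars.isspace c) = true
          · simp [hall]
          · simp [hall]

-- split₀ p ends with the maximal non-space suffix, when p's last char is non-space
lemma pv_split_last (p : List Char) (hp : p ≠ [])
    (hl : PySem.Chars.isspace (p.getLast hp) = false) :
    PySem.List.pyGetD (PySem.Chars.split₀ p) (-1) []
      = (p.reverse.takeWhile (fun c => !PySem.Chars.isspace c)).reverse := by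
  show PySem.List.pyGetD (PySem.Chars.split₀.go p [] []) (-1) [] = _
  rw [pv_go_last p [] [] hp hl]
  split
  · rename_i hall
    rw [List.takeWhile_eq_self_iff.mpr (by
      intro x hx
      exact (List.all_eq_true.mp hall) x (List.mem_reverse.mp hx))]
    simp
  · rfl

-- once past index chars_num - 1, A's loop never fires
lemma pvALoop_nofire (full : List Char) (cn : Int) (l : List Char) :
    ∀ (s : Int), cn - 1 < s → pvALoop full cn (PySem.List.enumerate l s) = "" := by
  induction l with
  | nil => intro s _; simp [PySem.List.enumerate, pvALoop]
  | cons c rest ih =>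
    intro s hs
    rw [PySem.List.enumerate_cons]
    simp only [pvALoop]
    rw [if_neg (by rintro ⟨h1, -⟩; omega)]
    exact ih (s + 1) (by omega)

-- A's loop over the enumerate of the suffix from s computes the direct test at chars_num - 1
lemma pvALoop_enum (full : List Char) (cn : Int) :
    ∀ (l : List Char) (s : Nat), l = full.drop s → (s : Int) ≤ cn - 1 →
      cn - 1 < (s : Int) + l.length →
    pvALoop full cn (PySem.List.enumerate l (s : Int))
      = if PySem.Chars.strip [PySem.List.pyGetD full (cn - 1) ' '] ≠ [] ∧
            PySem.Chars.strip [PySem.List.pyGetD full cn ' '] = [] then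
          String.ofList (PySem.List.pyGetD
            (PySem.Chars.split₀ (PySem.List.slice full none (some cn))) (-1) [])
        else "" := by
  intro l
  induction l with
  | nil => intro s _ h1 h2; simp at h2; omega
  | cons c rest ih =>
    intro s hdrop h1 h2
    have hslen : s < full.length := by
      by_contra h
      rw [List.drop_eq_nil_of_le (by omega)] at hdrop
      exact absurd hdrop (by simp)
    have hc : c = full[s]'hslen := by
      rw [List.drop_eq_getElem_cons hslen] at hdrop
      exact (List.cons_eq_cons.mp hdrop).1
    rw [PySem.List.enumerate_cons]
    simp only [pvALoop]
    by_cases hs : (s : Int) + 1 = cn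
    · have hcn1 : cn - 1 = (s : Int) := by omega
      have hget : PySem.List.pyGetD full (cn - 1) ' ' = full[s]'hslen := by
        rw [hcn1, PySem.List.pyGetD_natCast, List.getD_eq_getElem?_getD,
          List.getElem?_eq_getElem hslen]
        rfl
      rw [hs, hget, ← hc]
      by_cases hcond : PySem.Chars.strip [c] ≠ [] ∧
          PySem.Chars.strip [PySem.List.pyGetD full cn ' '] = []
      · rw [if_pos ⟨rfl, hcond.1, hcond.2⟩, if_pos hcond]
      · rw [if_neg (by rintro ⟨-, h3, h4⟩; exact hcond ⟨h3, h4⟩), if_neg hcond]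
        exact pvALoop_nofire full cn rest cn (by omega)
    · rw [if_neg (by rintro ⟨h3, -⟩; exact hs h3)]
      have hd : rest = full.drop (s + 1) := by
        rw [List.drop_eq_getElem_cons hslen] at hdrop
        exact (List.cons_eq_cons.mp hdrop).2
      have := ih (s + 1) hd (by push_cast; omega)
        (by push_cast at h2 ⊢; simp at h2; omega)
      rw [← this]
      norm_cast

-- main
theorem word_by_chars_num_to_last_letter_spec : Claim_equal_word_by_chars_num_to_last_letter := by
  intro value cn _ hpre
  obtain ⟨hpos, hlastws⟩ := hpre
  unfold Spec_word_by_chars_num_to_last_letter word_by_chars_num_to_last_letter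
    word_by_chars_num_to_last_letter_alt
  set l := value.toList with hl
  by_cases hlt : (l.length : Int) < cn
  · simp [hlt]
  · rw [if_neg hlt, if_neg hlt]
    have hcnle : cn ≤ (l.length : Int) := by omega
    have hk : 0 < cn.toNat ∧ cn.toNat ≤ l.length := by omega
    rw [show (PySem.List.enumerate l : List (Int × Char)) = PySem.List.enumerate l ((0 : Nat) : Int) from by norm_num,
      pvALoop_enum l cn l 0 (by simp) (by omega) (by simp; omega)]
    by_cases hcond : PySem.Chars.strip [PySem.List.pyGetD l (cn - 1) ' '] ≠ [] ∧
        PySem.Chars.strip [PySem.List.pyGetD l cn ' '] = []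
    · rw [if_pos hcond, if_pos hcond]
      -- the fired value: last word of the prefix = backward-scan slice
      have hklt : cn.toNat - 1 < l.length := by omega
      have hget : PySem.List.pyGetD l (cn - 1) ' ' = l[cn.toNat - 1]'hklt := by
        rw [PySem.List.pyGetD_eq_getElem l ' ' (by omega) (by omega)]
        congr 1
        omega
      have hns : PySem.Chars.isspace (l[cn.toNat - 1]'hklt) = false := by
        rw [hget] at hcond
        cases h : PySem.Chars.isspace (l[cn.toNat - 1]'hklt)
        · rfl
        · exact absurd ((pv_strip_singleton _).mpr h) hcond.1
      have hslice : PySem.List.slice l none (some cn) = l.take cn.toNat :=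
        PySem.List.slice_to l (by omega)
      have hpne : l.take cn.toNat ≠ [] :=
        List.ne_nil_of_length_pos (by simp; omega)
      have hlast : (l.take cn.toNat).getLast hpne = l[cn.toNat - 1]'hklt := by
        rw [List.getLast_eq_getElem]
        simp only [List.getElem_take, List.length_take]
        congr 1
        omega
      rw [hslice, pv_split_last _ hpne (by rw [hlast]; exact hns)]
      have hsucc : cn.toNat - 1 + 1 = cn.toNat := by omega
      have hscan := pvBScan_drop l (cn.toNat - 1) hklt hns
      rw [hsucc] at hscan
      have hj : pvBScan l (cn.toNat - 1) ≤ cn.toNat - 1 := pvBScan_le _ _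
      have htonat : (cn - 1).toNat = cn.toNat - 1 := by omega
      rw [htonat, PySem.List.slice_toNat l (by positivity) (by omega)]
      congr 1
      rw [← hscan, List.drop_take]
      simp only [Int.toNat_natCast]
    · rw [if_neg hcond, if_neg hcond]
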